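-- pv_equiv track=rewrite | github.com/TangLiGo/Stateful-CCSH | Baseline2/dataset4/b_authentication/dataset4_threshold_find.py | false_negatives_statistic
-- ===== SOURCE A (Python) =====
-- def false_negatives_statistic(window_size,results):
--
--     false_frames=[]
--     for index, value in enumerate(results):
--         if value>0:
--             false_frames.extend(
--                 range(index * window_size - int(window_size / 2), index * window_size + int(window_size / 2)))
--     false_negatives=len(false_frames)
--     return false_negatives
-- ===== SOURCE B (Python) =====
-- def false_negatives_statistic(window_size, results):
--     # Each positive result contributes a window of 2*(window_size//2) frames
--     # (empty when window_size <= 0), so count positives once and multiply.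
--     span = 2 * (window_size // 2)
--     if span < 0:
--         span = 0
--     positives = sum(1 for v in results if v > 0)
--     return span * positives
-- ===== Notes on version B (the rewrite author's own statement) =====
-- stated objective: faster
-- what changed: Instead of materialising a range of frame indices per positive window and taking the length of the accumulated list, B counts the positive entries in one pass and multiplies by the constant window span max(0, 2*(window_size//2)).
import Mathlib
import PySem

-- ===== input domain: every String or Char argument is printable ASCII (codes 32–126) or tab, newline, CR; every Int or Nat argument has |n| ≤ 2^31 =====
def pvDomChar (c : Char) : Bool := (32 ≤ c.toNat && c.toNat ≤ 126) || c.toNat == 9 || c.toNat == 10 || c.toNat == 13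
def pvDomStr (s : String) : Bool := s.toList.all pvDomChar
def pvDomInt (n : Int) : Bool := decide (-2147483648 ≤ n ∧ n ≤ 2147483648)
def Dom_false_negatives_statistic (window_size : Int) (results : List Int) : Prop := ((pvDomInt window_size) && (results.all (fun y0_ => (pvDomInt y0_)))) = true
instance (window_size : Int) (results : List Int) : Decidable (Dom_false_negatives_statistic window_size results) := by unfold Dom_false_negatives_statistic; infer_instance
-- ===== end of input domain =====

-- B replaces A's per-window range materialisation by one pass counting positives times the constant span (faster).

-- ===== PORT A =====
-- 'int(window_size / 2)' in Python truncates the exact float quotient toward zero = PySem.Int.truncdiv.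
def false_negatives_statistic (window_size : Int) (results : List Int) : Int :=
  let false_frames : List Int :=
    (PySem.List.enumerate results).foldl
      (fun acc p =>
        if p.2 > 0 then
          acc ++ PySem.List.pyRange (p.1 * window_size - PySem.Int.truncdiv window_size 2)
                                    (p.1 * window_size + PySem.Int.truncdiv window_size 2) 1
        else acc) []
  (false_frames.length : Int)

-- ===== PORT B =====
def false_negatives_statistic_alt (window_size : Int) (results : List Int) : Int :=
  let span0 := 2 * PySem.Int.floordiv window_size 2
  let span := if span0 < 0 then 0 else span0
  let positives : Int := results.foldl (fun c v => if v > 0 then c + 1 else c) 0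
  span * positives

-- ===== PRECONDITION & SPEC =====
def Spec_false_negatives_statistic (window_size : Int) (results : List Int) (out : Int) : Prop := out = false_negatives_statistic_alt window_size results
instance (window_size : Int) (results : List Int) (out : Int) : Decidable (Spec_false_negatives_statistic window_size results out) := by unfold Spec_false_negatives_statistic; infer_instance

-- ===== CLAIM (what is proved, stated in full; the proofs are below) =====
def Claim_equal_false_negatives_statistic : Prop := ∀ (window_size : Int) (results : List Int), Dom_false_negatives_statistic window_size results → Spec_false_negatives_statistic window_size results (false_negatives_statistic window_size results)

-- ===== LEMMAS AND PROOFS =====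

-- length of A's accumulated list: each positive entry adds (2*truncdiv ws 2).toNat frames.
theorem pvA_foldl_length (ws : Int) (rs : List Int) (s : Int) (acc : List Int) :
    ((PySem.List.enumerate rs s).foldl
      (fun acc p =>
        if p.2 > 0 then
          acc ++ PySem.List.pyRange (p.1 * ws - PySem.Int.truncdiv ws 2)
                                    (p.1 * ws + PySem.Int.truncdiv ws 2) 1
        else acc) acc).length
    = acc.length + (2 * PySem.Int.truncdiv ws 2).toNat * rs.countP (fun v => decide (v > 0)) := by
  induction rs generalizing s acc with
  | nil => simp [PySem.List.enumerate_nil]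
  | cons x xs ih =>
    rw [PySem.List.enumerate_cons]
    simp only [List.foldl_cons, List.countP_cons]
    by_cases hx : x > 0
    · have hmid : (s * ws + PySem.Int.truncdiv ws 2 - (s * ws - PySem.Int.truncdiv ws 2))
          = 2 * PySem.Int.truncdiv ws 2 := by ring
      rw [if_pos hx, ih, List.length_append, PySem.List.length_pyRange_one, hmid]
      simp only [hx, decide_true, if_pos]
      ring
    · rw [if_neg hx, ih]
      simp [hx]

theorem pvB_count (rs : List Int) (c : Int) :
    rs.foldl (fun c v => if v > 0 then c + 1 else c) c
    = c + (rs.countP (fun v => decide (v > 0)) : Int) := by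
  induction rs generalizing c with
  | nil => simp
  | cons x xs ih =>
    simp only [List.foldl_cons, List.countP_cons]
    by_cases hx : x > 0
    · simp [hx, ih]; ring
    · simp [hx, ih]

theorem pvSpan_eq (ws : Int) :
    ((2 * PySem.Int.truncdiv ws 2).toNat : Int)
      = (if 2 * PySem.Int.floordiv ws 2 < 0 then 0 else 2 * PySem.Int.floordiv ws 2) := by
  have ht : PySem.Int.truncdiv ws 2 = Int.tdiv ws 2 := by
    simp [PySem.Int.truncdiv]
  have hf : PySem.Int.floordiv ws 2 = ws / 2 := by
    simp [PySem.Int.floordiv]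
    exact Int.fdiv_eq_ediv_of_nonneg ws (by norm_num)
  rw [ht, hf]
  by_cases h : 0 ≤ ws
  · rw [Int.tdiv_eq_ediv_of_nonneg h]
    have : 0 ≤ ws / 2 := by positivity
    rw [if_neg (by omega)]
    omega
  · have h1 : Int.tdiv (-ws) 2 = (-ws) / 2 := Int.tdiv_eq_ediv_of_nonneg (by omega)
    have h2 : Int.tdiv (-ws) 2 = -(Int.tdiv ws 2) := Int.neg_tdiv ws 2
    rw [if_pos (by omega)]
    omega

-- ===== VERDICT (by name: the statement is the Claim_ definition above) =====
theorem false_negatives_statistic_spec : Claim_equal_false_negatives_statistic := by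
  intro ws rs _
  unfold Spec_false_negatives_statistic false_negatives_statistic false_negatives_statistic_alt
  simp only []
  rw [pvA_foldl_length ws rs 0 [], pvB_count rs 0]
  simp only [List.length_nil, Nat.zero_add, Int.zero_add]
  push_cast
  rw [pvSpan_eq ws]
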